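-- pv_equiv track=rewrite | github.com/MrBrantCode/unitest_baseline | mut_generate/mist_train_cf/cf_85296/solution.py | count_unique_employees
-- ===== SOURCE A (Python) =====
-- def count_unique_employees(company_list):
--     """Return a dictionary with company names as keys and the number of unique employees as values."""
--     company_dict = {}
--     for company in company_list:
--         company_name = company[0]
--         if company_name not in company_dict:
--             company_dict[company_name] = set()
--         for employee in company[1:]:
--             company_dict[company_name].add(employee)
--     return {company: len(employees) for company, employees in company_dict.items()}
-- ===== SOURCE B (Python) =====
-- def count_unique_employees(company_list):
--     """Return a dictionary with company names as keys and the number of unique employees as values."""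
--     names = []
--     for company in company_list:
--         if company[0] not in names:
--             names.append(company[0])
--     return {name: len({employee
--                        for company in company_list if company[0] == name
--                        for employee in company[1:]})
--             for name in names}
-- ===== Notes on version B (the rewrite author's own statement) =====
-- stated objective: alternative
-- what changed: B maintains no dict during the scan: it first collects the company names in first-appearance order, then computes each count independently by rescanning the whole input with a set comprehension over the matching companies, instead of A's single pass that grows a dict of sets in place.
import Mathlib
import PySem

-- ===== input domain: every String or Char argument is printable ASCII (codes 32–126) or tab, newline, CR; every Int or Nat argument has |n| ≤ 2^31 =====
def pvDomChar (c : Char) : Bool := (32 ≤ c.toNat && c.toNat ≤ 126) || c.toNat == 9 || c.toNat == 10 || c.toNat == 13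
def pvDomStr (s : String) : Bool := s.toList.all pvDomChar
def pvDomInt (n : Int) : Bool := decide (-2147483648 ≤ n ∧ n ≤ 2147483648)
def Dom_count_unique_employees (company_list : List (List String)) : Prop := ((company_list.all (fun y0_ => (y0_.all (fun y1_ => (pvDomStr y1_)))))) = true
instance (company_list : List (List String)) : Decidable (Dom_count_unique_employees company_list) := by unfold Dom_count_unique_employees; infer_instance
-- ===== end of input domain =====

-- B maintains no dict during the scan: it first collects the company names in first-appearance
-- order, then counts each company's unique employees by an independent rescan of the whole list
-- (objective: alternative algorithm, staged passes instead of A's in-place dict of sets).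

-- ===== PORT A =====
def count_unique_employees (company_list : List (List String)) : List (String × Int) :=
  (company_list.foldl (fun d company =>
      match PySem.List.pyGet? company 0 with     -- company[0]; none = IndexError (outside Pre_)
      | none => d
      | some company_name =>
        (PySem.List.slice company (some 1) none).foldl
          (fun d employee =>
            d.modify company_name PySem.Set.empty (fun s => PySem.Set.add s employee))
          (if d.contains company_name then d
           else d.insert company_name PySem.Set.empty))
    (PySem.Dict.empty : PySem.Dict String (PySem.Set String))).items.map
    (fun p => (p.1, (PySem.Set.len p.2 : Int)))

-- ===== PORT B =====
def count_unique_employees_alt (company_list : List (List String)) : List (String × Int) :=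
  -- pass 1: company names in first-appearance order
  let names := company_list.foldl (fun ns company =>
      match PySem.List.pyGet? company 0 with     -- company[0]; none = IndexError (outside Pre_)
      | none => ns
      | some n => if ns.contains n then ns else ns ++ [n]) ([] : List String)
  -- pass 2: per name, the set comprehension {e for company in company_list if company[0] == name for e in company[1:]}
  names.map (fun name =>
    (name, (PySem.Set.len (company_list.foldl (fun s company =>
        if PySem.List.pyGet? company 0 == some name then
          (PySem.List.slice company (some 1) none).foldl PySem.Set.add s
        else s) PySem.Set.empty) : Int)))

-- ===== PRECONDITION & SPEC =====
-- Pre_ excludes exactly the inputs containing an empty inner list, on which the Python A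
-- (and B alike) raises IndexError at company[0].
def Pre_count_unique_employees (company_list : List (List String)) : Prop :=
  ∀ c ∈ company_list, c ≠ []
instance (company_list : List (List String)) : Decidable (Pre_count_unique_employees company_list) := by unfold Pre_count_unique_employees; infer_instance

def pvWitness_count_unique_employees : List (List String) :=
  [["acme", "bob", "ann", "bob"], ["zeta"], ["acme", "ann"]]

def Spec_count_unique_employees (company_list : List (List String)) (out : List (String × Int)) : Prop := out = count_unique_employees_alt company_list
instance (company_list : List (List String)) (out : List (String × Int)) : Decidable (Spec_count_unique_employees company_list out) := by unfold Spec_count_unique_employees; infer_instance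

-- ===== CLAIM (what is proved, stated in full; the proofs are below) =====
def Claim_equal_count_unique_employees : Prop := ∀ (company_list : List (List String)), Dom_count_unique_employees company_list → Pre_count_unique_employees company_list → Spec_count_unique_employees company_list (count_unique_employees company_list)

-- ===== LEMMAS AND PROOFS =====

-- A's fold step, B's names step and B's per-name employee step, named for the proofs
def pvStepA (d : PySem.Dict String (PySem.Set String)) (company : List String) :
    PySem.Dict String (PySem.Set String) :=
  match PySem.List.pyGet? company 0 with
  | none => d
  | some company_name =>
    (PySem.List.slice company (some 1) none).foldl
      (fun d employee =>
        d.modify company_name PySem.Set.empty (fun s => PySem.Set.add s employee))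
      (if d.contains company_name then d
       else d.insert company_name PySem.Set.empty)

def pvStepN (ns : List String) (company : List String) : List String :=
  match PySem.List.pyGet? company 0 with
  | none => ns
  | some n => if ns.contains n then ns else ns ++ [n]

def pvStepE (name : String) (s : PySem.Set String) (company : List String) : PySem.Set String :=
  if PySem.List.pyGet? company 0 == some name then
    (PySem.List.slice company (some 1) none).foldl PySem.Set.add s
  else s

-- replacing the (unique) entry at key k by its own value is the identity on the items list
theorem pv_map_replace_self {ν : Type} (items : List (String × ν)) (k : String) (v : ν)
    (h : (k, v) ∈ items) (hnd : (items.map Prod.fst).Nodup) :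
    items.map (fun p => if p.1 == k then (k, v) else p) = items := by
  induction items with
  | nil => simp at h
  | cons q t ih =>
    simp only [List.map_cons, List.nodup_cons] at hnd
    rcases List.mem_cons.mp h with h1 | h1
    · have hq : q = (k, v) := h1.symm
      subst hq
      have hk0 : k ∉ t.map Prod.fst := hnd.1
      have ht : t.map (fun p => if p.1 == k then (k, v) else p) = t := by
        rw [List.map_congr_left (g := id) ?_, List.map_id]
        intro p hp
        have hb : (p.1 == k) = false := by
          apply beq_eq_false_iff_ne.mpr
          intro e
          exact hk0 (e ▸ List.mem_map_of_mem hp)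
        simp [hb]
      simp only [List.map_cons, ht]
      simp
    · have hq : (q.1 == k) = false := by
        apply beq_eq_false_iff_ne.mpr
        intro e
        apply hnd.1
        rw [e]
        exact List.mem_map.mpr ⟨(k, v), h1, rfl⟩
      simp only [List.map_cons, hq, Bool.false_eq_true, if_false, List.cons.injEq, true_and]
      exact ih h1 hnd.2

-- A's inner loop: folding set.add over t into the (present) entry at k is one insert of Set.update
theorem pv_foldl_modify_add (t : List String) (d : PySem.Dict String (PySem.Set String))
    (k : String) (hk : d.contains k = true) (hnd : d.keys.Nodup) :
    t.foldl (fun d e => d.modify k PySem.Set.empty (fun s => PySem.Set.add s e)) d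
      = d.insert k (PySem.Set.update (d.getD k PySem.Set.empty) t) := by
  induction t generalizing d with
  | nil =>
    have hsome : (d.get? k).isSome = true := by
      rw [← PySem.Dict.contains_eq_isSome_get? d k]; exact hk
    obtain ⟨v, hv⟩ := Option.isSome_iff_exists.mp hsome
    have hgd : d.getD k PySem.Set.empty = v :=
      PySem.Dict.getD_of_get?_eq_some d PySem.Set.empty hv
    show d = d.insert k (PySem.Set.update (d.getD k PySem.Set.empty) [])
    have hupd : PySem.Set.update (d.getD k PySem.Set.empty) [] = v := by
      rw [← hgd]; rfl
    rw [hupd]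
    symm
    apply PySem.Dict.ext
    rw [PySem.Dict.items_insert_of_contains d v hk]
    exact pv_map_replace_self d.items k v (PySem.Dict.mem_items_of_get?_eq_some d hv) hnd
  | cons e t ih =>
    simp only [List.foldl_cons]
    have hins : d.modify k PySem.Set.empty (fun s => PySem.Set.add s e)
        = d.insert k (PySem.Set.add (d.getD k PySem.Set.empty) e) := rfl
    have hk1 : (d.modify k PySem.Set.empty (fun s => PySem.Set.add s e)).contains k = true := by
      rw [hins]; exact PySem.Dict.contains_insert_self d k _
    have hnd1 : (d.modify k PySem.Set.empty (fun s => PySem.Set.add s e)).keys.Nodup := by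
      rw [hins, PySem.Dict.keys_insert_of_contains d _ hk]; exact hnd
    rw [ih _ hk1 hnd1, hins,
        PySem.Dict.getD_insert_self d k (PySem.Set.add (d.getD k PySem.Set.empty) e) PySem.Set.empty,
        PySem.Dict.insert_insert_self]
    rfl

-- a dict with nodup keys is its key list paired with the corresponding getD values
theorem pv_items_eq_keys_map (d : PySem.Dict String (PySem.Set String)) (hnd : d.keys.Nodup) :
    d.items = d.keys.map (fun n => (n, d.getD n PySem.Set.empty)) := by
  have hk : d.keys = d.items.map Prod.fst := rfl
  rw [hk, List.map_map]
  symm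
  rw [List.map_congr_left (g := id) ?_, List.map_id]
  intro p hp
  obtain ⟨k, v⟩ := p
  have hgd : d.getD k PySem.Set.empty = v := PySem.Dict.getD_of_mem_items d hp hnd PySem.Set.empty
  simp only [PySem.Set.empty] at hgd
  simp [hgd]

-- main invariant: A's fold over the remaining companies, started from any nodup-keyed dict,
-- yields the names-fold of the keys paired with the per-name employee folds continued from getD
theorem pv_main (cl : List (List String)) (hpre : ∀ c ∈ cl, c ≠ [])
    (d : PySem.Dict String (PySem.Set String)) (hnd : d.keys.Nodup) :
    (cl.foldl pvStepA d).items
      = (cl.foldl pvStepN d.keys).map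
          (fun n => (n, cl.foldl (pvStepE n) (d.getD n PySem.Set.empty))) := by
  induction cl generalizing d with
  | nil => exact pv_items_eq_keys_map d hnd
  | cons c cs ih =>
    rcases c with _ | ⟨x, t⟩
    · exact absurd rfl (hpre [] List.mem_cons_self)
    have hget : PySem.List.pyGet? (x :: t) 0 = some x := by
      simp [PySem.List.pyGet?, PySem.List.pyIdx?]
    have hslice : PySem.List.slice (x :: t) (some 1) none = t := by
      rw [PySem.List.slice_from_one]; rfl
    have hcont : d.contains x = d.keys.contains x := by
      rw [PySem.Dict.contains_eq_decide_mem_keys]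
      simp
    have hred : pvStepA d (x :: t)
        = t.foldl (fun d employee => d.modify x PySem.Set.empty (fun s => PySem.Set.add s employee))
            (if d.contains x = true then d else d.insert x PySem.Set.empty) := by
      unfold pvStepA
      rw [hget, hslice]
    have hredN : pvStepN d.keys (x :: t)
        = (if d.keys.contains x = true then d.keys else d.keys ++ [x]) := by
      unfold pvStepN
      rw [hget]
    -- the step yields d.insert x (update (getD x) t) in both branches
    have hstep : pvStepA d (x :: t)
        = d.insert x (PySem.Set.update (d.getD x PySem.Set.empty) t) := by
      rw [hred]
      by_cases hx : d.contains x = true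
      · rw [if_pos hx]
        exact pv_foldl_modify_add t d x hx hnd
      · have hxf : d.contains x = false := by simpa using hx
        have hx0 : x ∉ d.keys := by
          intro hm
          rw [PySem.Dict.contains_eq_decide_mem_keys] at hxf
          simp [hm] at hxf
        have hnd' : (d.insert x PySem.Set.empty).keys.Nodup := by
          rw [PySem.Dict.keys_insert_of_not_contains d _ hxf, List.nodup_append]
          exact ⟨hnd, List.nodup_singleton x, by
            intro a ha b hb
            rw [List.mem_singleton] at hb
            subst hb
            intro e; exact hx0 (e ▸ ha)⟩
        have hgD : d.getD x PySem.Set.empty = PySem.Set.empty := by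
          have hnone : d.get? x = none := by
            have := PySem.Dict.contains_eq_isSome_get? d x
            rw [hxf] at this
            exact Option.not_isSome_iff_eq_none.mp (by simp [← this])
          simp [PySem.Dict.getD, hnone]
        rw [if_neg hx,
            pv_foldl_modify_add t _ x (PySem.Dict.contains_insert_self d x _) hnd',
            PySem.Dict.getD_insert_self, PySem.Dict.insert_insert_self, hgD]
    have hkeys' : (pvStepA d (x :: t)).keys = pvStepN d.keys (x :: t) := by
      rw [hstep, hredN, ← hcont]
      by_cases hx : d.contains x = true
      · rw [if_pos hx, PySem.Dict.keys_insert_of_contains d _ hx]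
      · have hxf : d.contains x = false := by simpa using hx
        rw [if_neg hx, PySem.Dict.keys_insert_of_not_contains d _ hxf]
    have hnd' : (pvStepA d (x :: t)).keys.Nodup := by
      rw [hstep]
      by_cases hx : d.contains x = true
      · rw [PySem.Dict.keys_insert_of_contains d _ hx]; exact hnd
      · have hxf : d.contains x = false := by simpa using hx
        have hx0 : x ∉ d.keys := by
          intro hm
          rw [PySem.Dict.contains_eq_decide_mem_keys] at hxf
          simp [hm] at hxf
        rw [PySem.Dict.keys_insert_of_not_contains d _ hxf, List.nodup_append]
        exact ⟨hnd, List.nodup_singleton x, by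
          intro a ha b hb
          rw [List.mem_singleton] at hb
          subst hb
          intro e; exact hx0 (e ▸ ha)⟩
    have hgetD : ∀ n, (pvStepA d (x :: t)).getD n PySem.Set.empty
        = pvStepE n (d.getD n PySem.Set.empty) (x :: t) := by
      intro n
      rw [hstep]
      unfold pvStepE
      rw [hget, hslice, PySem.Dict.getD_insert]
      by_cases he : n = x
      · subst he
        simp
        rfl
      · have hb : (x == n) = false := beq_eq_false_iff_ne.mpr (Ne.symm he)
        simp [he, hb]
    simp only [List.foldl_cons]
    rw [ih (fun c hc => hpre c (List.mem_cons_of_mem _ hc)) (pvStepA d (x :: t)) hnd',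
        hkeys']
    apply List.map_congr_left
    intro n _
    rw [hgetD n]

-- ===== VERDICT (by name: the statement is the Claim_ definition above) =====
theorem count_unique_employees_spec : Claim_equal_count_unique_employees := by
  intro cl _ hpre
  show count_unique_employees cl = count_unique_employees_alt cl
  unfold count_unique_employees count_unique_employees_alt
  have h := pv_main cl hpre PySem.Dict.empty List.nodup_nil
  have hA : (cl.foldl (fun d company =>
      match PySem.List.pyGet? company 0 with
      | none => d
      | some company_name =>
        (PySem.List.slice company (some 1) none).foldl
          (fun d employee =>
            d.modify company_name PySem.Set.empty (fun s => PySem.Set.add s employee))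
          (if d.contains company_name then d
           else d.insert company_name PySem.Set.empty))
    (PySem.Dict.empty : PySem.Dict String (PySem.Set String)))
      = cl.foldl pvStepA PySem.Dict.empty := rfl
  rw [hA, h, List.map_map]
  rfl
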